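-- pv_equiv track=rewrite | github.com/ark2016/VK-Technopark-project-2024 | data_mining/tests/functions/file_1001_1020.py | create_list_between_min_in_dict_and_max_in_set
-- ===== SOURCE A (Python) =====
-- def create_list_between_min_in_dict_and_max_in_set(d, s):
--     if not d or not s:
--         return None
--     min_dict = min(d.values())
--     max_set = max(s)
--     result = []
--     for value in sorted(d.values()):
--         if min_dict < value < max_set:
--             result.append(value)
--     return result if result else None
-- ===== SOURCE B (Python) =====
-- import bisect
--
-- def create_list_between_min_in_dict_and_max_in_set(d, s):
--     if not d or not s:
--         return None
--     vals = sorted(d.values())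
--     lo = bisect.bisect_right(vals, vals[0])   # past all copies of the minimum (strict >)
--     hi = bisect.bisect_left(vals, max(s))     # first index reaching max(s) (strict <)
--     return vals[lo:hi] if lo < hi else None
-- ===== Notes on version B (the rewrite author's own statement) =====
-- stated objective: alternative
-- what changed: Instead of scanning the sorted values with a per-element comparison against min and max, B sorts once and locates the strict boundaries with bisect_right(min)/bisect_left(max), returning the slice between them (None if empty).
import Mathlib
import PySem

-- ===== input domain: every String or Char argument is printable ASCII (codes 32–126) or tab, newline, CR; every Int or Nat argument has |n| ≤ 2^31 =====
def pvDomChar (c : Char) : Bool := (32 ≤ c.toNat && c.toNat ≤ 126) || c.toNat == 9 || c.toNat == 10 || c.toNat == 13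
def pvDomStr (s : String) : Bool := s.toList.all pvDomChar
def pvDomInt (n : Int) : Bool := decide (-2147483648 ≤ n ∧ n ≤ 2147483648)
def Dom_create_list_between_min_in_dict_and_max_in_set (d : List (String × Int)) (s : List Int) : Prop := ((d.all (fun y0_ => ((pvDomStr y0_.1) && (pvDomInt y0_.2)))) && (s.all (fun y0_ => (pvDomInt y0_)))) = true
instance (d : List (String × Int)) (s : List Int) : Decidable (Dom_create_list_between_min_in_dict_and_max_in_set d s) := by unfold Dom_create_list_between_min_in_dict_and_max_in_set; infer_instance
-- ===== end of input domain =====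

-- B replaces A's per-element comparison scan over the sorted values by bisect-located
-- strict boundaries (bisect_right on the minimum, bisect_left on max(s)) and a slice.


-- ===== PORT A =====
-- Port of A: min of the (unsorted) values, max of the set, then a foldl over the
-- sorted values appending those strictly between.
def create_list_between_min_in_dict_and_max_in_set (d : List (String × Int)) (s : List Int) : Option (List Int) :=
  if d = [] ∨ s = [] then none
  else
    match PySem.List.min? (PySem.Dict.mk d).values (fun x => x), PySem.List.max? s (fun x => x) with
    | some min_dict, some max_set =>
        let result := (PySem.List.sorted (PySem.Dict.mk d).values (fun x => x)).foldl
          (fun acc value => if min_dict < value ∧ value < max_set then acc ++ [value] else acc) []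
        if result = [] then none else some result
    | _, _ => none  -- unreachable: d ≠ [] and s ≠ []

-- ===== PORT B =====
-- Port of B (Source B): sort once, then bisect the strict boundaries and slice.
def create_list_between_min_in_dict_and_max_in_set_alt (d : List (String × Int)) (s : List Int) : Option (List Int) :=
  if d = [] ∨ s = [] then none
  else
    let vals := PySem.List.sorted (PySem.Dict.mk d).values (fun x => x)
    match PySem.List.pyGet? vals 0 with
    | none => none  -- unreachable: d ≠ []
    | some v0 =>
      match PySem.List.max? s (fun x => x) with
      | none => none  -- unreachable: s ≠ []
      | some mx =>
        let lo := PySem.List.bisectRight vals v0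
        let hi := PySem.List.bisectLeft vals mx
        if lo < hi then some (PySem.List.slice vals (some (lo : Int)) (some (hi : Int))) else none

-- ===== PRECONDITION & SPEC =====
def Spec_create_list_between_min_in_dict_and_max_in_set (d : List (String × Int)) (s : List Int) (out : Option (List Int)) : Prop := out = create_list_between_min_in_dict_and_max_in_set_alt d s
instance (d : List (String × Int)) (s : List Int) (out : Option (List Int)) : Decidable (Spec_create_list_between_min_in_dict_and_max_in_set d s out) := by unfold Spec_create_list_between_min_in_dict_and_max_in_set; infer_instance

-- ===== CLAIM (what is proved, stated in full; the proofs are below) =====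
def Claim_equal_create_list_between_min_in_dict_and_max_in_set : Prop := ∀ (d : List (String × Int)) (s : List Int), Dom_create_list_between_min_in_dict_and_max_in_set d s → Spec_create_list_between_min_in_dict_and_max_in_set d s (create_list_between_min_in_dict_and_max_in_set d s)

-- ===== LEMMAS AND PROOFS =====

-- ===== VERDICT (by name: the statement is the Claim_ definition above) =====
-- filter with an index-interval characterisation is a drop/take window
theorem pv_filter_eq_drop_take {α : Type} (p : α → Bool) :
    ∀ (xs : List α) (lo hi : Nat),
    (∀ j (hj : j < xs.length), p xs[j] = decide (lo ≤ j ∧ j < hi)) →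
    xs.filter p = (xs.drop lo).take (hi - lo) := by
  intro xs
  induction xs with
  | nil => intro lo hi _; simp
  | cons x t ih =>
    intro lo hi h
    have h0 := h 0 (by simp)
    rw [List.getElem_cons_zero] at h0
    have htail : ∀ (lo' hi' : Nat), ((lo ≤ 0 ∧ 0 < hi) → False) ∨ True →
        (∀ j, (lo ≤ j + 1 ∧ j + 1 < hi) ↔ (lo' ≤ j ∧ j < hi')) →
        t.filter p = (t.drop lo').take (hi' - lo') := by
      intro lo' hi' _ hiff
      refine ih lo' hi' (fun j hj => ?_)
      have hh := h (j + 1) (by simpa using Nat.succ_lt_succ hj)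
      rw [List.getElem_cons_succ] at hh
      rw [hh]
      exact decide_eq_decide.mpr (hiff j)
    by_cases hlo : lo = 0
    · subst hlo
      by_cases hhi : 0 < hi
      · obtain ⟨k, rfl⟩ : ∃ k, hi = k + 1 := ⟨hi - 1, by omega⟩
        have hx : p x = true := by rw [h0]; exact decide_eq_true (by omega)
        have ht := htail 0 k (Or.inr trivial) (fun j => by omega)
        simp [hx, ht]
      · have hhi0 : hi = 0 := by omega
        subst hhi0
        have hx : p x = false := by rw [h0]; exact decide_eq_false (by omega)
        have ht := htail 0 0 (Or.inr trivial) (fun j => by omega)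
        simp [hx, ht]
    · have hx : p x = false := by rw [h0]; exact decide_eq_false (by omega)
      have ht := htail (lo - 1) (hi - 1) (Or.inr trivial) (fun j => by omega)
      have hdrop : (x :: t).drop lo = t.drop (lo - 1) := by
        obtain ⟨k, rfl⟩ := Nat.exists_eq_succ_of_ne_zero hlo
        simp
      have harith : hi - lo = (hi - 1) - (lo - 1) := by omega
      simp [hx, ht, hdrop, harith]

theorem create_list_between_min_in_dict_and_max_in_set_spec : Claim_equal_create_list_between_min_in_dict_and_max_in_set := by
  intro d s _
  unfold Spec_create_list_between_min_in_dict_and_max_in_set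
  unfold create_list_between_min_in_dict_and_max_in_set create_list_between_min_in_dict_and_max_in_set_alt
  by_cases hds : d = [] ∨ s = []
  · simp [hds]
  · rw [if_neg hds, if_neg hds]
    push_neg at hds
    obtain ⟨hd, hs⟩ := hds
    set vs := (PySem.Dict.mk d).values with hvs
    have hvsne : vs ≠ [] := by
      simp only [hvs, PySem.Dict.values, ne_eq, List.map_eq_nil_iff]
      exact hd
    obtain ⟨m, hm⟩ : ∃ m, PySem.List.min? vs (fun x => x) = some m := by
      cases hmin : PySem.List.min? vs (fun x => x) with
      | none => exact absurd ((PySem.List.min?_eq_none_iff _ _).mp hmin) hvsne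
      | some m => exact ⟨m, rfl⟩
    obtain ⟨mx, hmx⟩ : ∃ mx, PySem.List.max? s (fun x => x) = some mx := by
      cases hmax : PySem.List.max? s (fun x => x) with
      | none => exact absurd ((PySem.List.max?_eq_none_iff _ _).mp hmax) hs
      | some mx => exact ⟨mx, rfl⟩
    set sv := PySem.List.sorted vs (fun x => x) with hsv
    have hsvne : sv ≠ [] := by
      rw [hsv, ne_eq, PySem.List.sorted_eq_nil_iff]
      exact hvsne
    obtain ⟨h0, tl, hcons⟩ := List.exists_cons_of_ne_nil hsvne
    have hget : PySem.List.pyGet? sv 0 = some h0 := by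
      have := PySem.List.pyGet?_natCast sv 0
      rw [hcons] at this ⊢
      simpa using this
    -- h0 = m : the head of the sorted values is the minimum
    have hp : sv.Pairwise (· ≤ ·) := by
      have := PySem.List.sorted_pairwise vs (fun x => x)
      simpa [hsv] using this
    have hm_mem : m ∈ sv := by
      rw [hsv, PySem.List.mem_sorted]
      exact PySem.List.min?_mem hm
    have h0m : h0 = m := by
      have h1 : m ≤ h0 := by
        have h0mem : h0 ∈ vs := by
          have : h0 ∈ sv := by rw [hcons]; exact List.mem_cons_self
          rw [hsv, PySem.List.mem_sorted] at this
          exact this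
        exact PySem.List.min?_isMin hm h0 h0mem
      have h2 : h0 ≤ m := by
        rw [hcons] at hm_mem hp
        rcases List.mem_cons.mp hm_mem with h | h
        · omega
        · exact (List.pairwise_cons.mp hp).1 m h
      omega
    rw [h0m] at hget
    -- bisect boundaries
    set lo := PySem.List.bisectRight sv m with hlo
    set hi := PySem.List.bisectLeft sv mx with hhi
    obtain ⟨hlo_le, hlo1, hlo2⟩ := PySem.List.bisectRight_spec sv m hp
    obtain ⟨hhi_le, hhi1, hhi2⟩ := PySem.List.bisectLeft_spec sv mx hp
    -- index characterisation of the filter predicate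
    have hchar : ∀ j (hj : j < sv.length),
        (fun v => decide (m < v ∧ v < mx)) sv[j] = decide (lo ≤ j ∧ j < hi) := by
      intro j hj
      apply decide_eq_decide.mpr
      constructor
      · rintro ⟨h1, h2⟩
        refine ⟨?_, ?_⟩
        · by_contra hc
          push_neg at hc
          exact absurd h1 (not_lt.mpr (hlo1 j hj hc))
        · by_contra hc
          push_neg at hc
          exact absurd h2 (not_lt.mpr (hhi2 j hj hc))
      · rintro ⟨h1, h2⟩
        exact ⟨hlo2 j hj h1, hhi1 j hj h2⟩
    have hfilter : sv.filter (fun v => decide (m < v ∧ v < mx)) = (sv.drop lo).take (hi - lo) :=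
      pv_filter_eq_drop_take _ sv lo hi hchar
    have hfold : sv.foldl (fun acc value => if m < value ∧ value < mx then acc ++ [value] else acc) [] =
        (sv.drop lo).take (hi - lo) := by
      have := PySem.List.foldl_append_if (fun v => decide (m < v ∧ v < mx)) (fun v => v) sv []
      simp only [decide_eq_true_eq, List.nil_append] at this
      rw [this, hfilter]
      simp
    have hslice : PySem.List.slice sv (some (lo : Int)) (some (hi : Int)) = (sv.drop lo).take (hi - lo) :=
      PySem.List.slice_natCast sv lo hi
    have hempty : ((sv.drop lo).take (hi - lo) = []) ↔ ¬ lo < hi := by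
      rw [List.take_eq_nil_iff, List.drop_eq_nil_iff]
      omega
    simp only [hm, hmx, hget]
    rw [← hlo, ← hhi, hfold, hslice]
    by_cases hlh : lo < hi
    · rw [if_neg (by rw [hempty]; exact not_not_intro hlh), if_pos hlh]
    · rw [if_pos (hempty.mpr hlh), if_neg hlh]
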